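-- pv_equiv track=rewrite | github.com/eurostat/wih_drones_companies | Script7_IniIE.py | getFirstCities
-- ===== SOURCE A (Python) =====
-- from operator import itemgetter
--
-- def getFirstCities(text1, included2, number = 5):
--     cities = []
--     cityPosList = []
--     ##Check input
--     if len(text1) > 0 and len(included2) > 0 and number > 0:
--         ##Get city names in sequence of occurence in text
--         for incl in included2:
--             ##get position of first occurence of incl in text1
--             posIncl = text1.index(incl)
--             ##deal with city names in uppercase
--             if posIncl == -1:
--                 posIncl = text1.index(incl.upper())
--             ##Add to cityPosList
--             cityPosList.append([incl, posIncl])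
--
--         ##sort list on position values
--         sortedCityList = sorted(cityPosList, key=itemgetter(1))
--         ##get number of cities
--         sortedCityList = sortedCityList[0:number]
--         ##get city names as list
--         cities = [x[0] for x in sortedCityList]
--
--     return(cities)
-- ===== SOURCE B (Python) =====
-- def getFirstCities(text1, included2, number = 5):
--     cities = []
--     ##Check input
--     if len(text1) > 0 and len(included2) > 0 and number > 0:
--         ##Sweep the text left to right; emit each name the first time it starts
--         ##at the current position (a counting sort by first position; no sort, no .index)
--         remaining = list(included2)
--         i = 0
--         while i < len(text1) and remaining:
--             cities += [name for name in remaining if text1.startswith(name, i)]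
--             remaining = [name for name in remaining if not text1.startswith(name, i)]
--             i += 1
--         cities = cities[:number]
--     return cities
-- ===== Notes on version B (the rewrite author's own statement) =====
-- stated objective: alternative
-- what changed: B removes A's (name, position) pair table, sort-by-position and name-extraction entirely: it sweeps the text left to right once, emitting each name the first time it starts at the current position (a counting sort by first occurrence), then truncates to 'number'.
import Mathlib
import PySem

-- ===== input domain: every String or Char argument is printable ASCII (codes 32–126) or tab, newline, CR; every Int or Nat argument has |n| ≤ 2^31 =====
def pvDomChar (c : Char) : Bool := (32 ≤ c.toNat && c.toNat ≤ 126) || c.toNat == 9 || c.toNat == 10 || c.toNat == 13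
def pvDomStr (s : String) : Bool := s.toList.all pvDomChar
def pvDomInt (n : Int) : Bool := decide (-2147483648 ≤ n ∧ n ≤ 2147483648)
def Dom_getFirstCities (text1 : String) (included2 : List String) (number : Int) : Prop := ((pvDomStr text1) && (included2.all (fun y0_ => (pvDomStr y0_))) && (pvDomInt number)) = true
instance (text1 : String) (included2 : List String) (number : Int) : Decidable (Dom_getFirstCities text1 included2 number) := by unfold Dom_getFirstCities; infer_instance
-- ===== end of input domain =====

-- B replaces A's build-pairs/sort-by-position/slice/extract pipeline with a sortless
-- left-to-right sweep over the text that emits each name the first time it starts at the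
-- current position (objective: alternative); return-value equivalence is proved on Pre_
-- (inputs where A's text1.index never raises).


-- ===== PORT A =====
-- literal transliteration of A; text1.index is ported as PySem.Str.find, which returns -1
-- where Python raises ValueError — Pre_ excludes exactly those inputs, so inside Pre_ the
-- port is exact (and A's '== -1' uppercase branch, unreachable in Python, is kept as written).
def getFirstCities (text1 : String) (included2 : List String) (number : Int) : List String :=
  let cities : List String := []
  if PySem.Str.len text1 > 0 ∧ included2.length > 0 ∧ number > 0 then
    let cityPosList : List (String × Int) :=
      included2.foldl (fun acc incl =>
        let posIncl := PySem.Str.find text1 incl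
        let posIncl := if posIncl == -1 then PySem.Str.find text1 (PySem.Str.upper incl) else posIncl
        acc ++ [(incl, posIncl)]) []
    let sortedCityList := PySem.List.sorted cityPosList (fun p => p.2)
    let sortedCityList := PySem.List.slice sortedCityList (some 0) (some number)
    sortedCityList.map (fun x => x.1)
  else cities

-- ===== PORT B =====
-- text1.startswith(name, i) for 0 ≤ i: exact as 'name.toList <+: text1.toList.drop i'
-- (PySem.Chars.startswith on the dropped suffix).
def pvStarts (text1 : String) (name : String) (i : Nat) : Bool :=
  PySem.Chars.startswith (text1.toList.drop i) name.toList

-- the while loop of Source B: while i < len(text1) and remaining: …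
def pvBLoop (text1 : String) (remaining : List String) (cities : List String) (i : Nat) : List String :=
  if i < text1.toList.length ∧ remaining ≠ [] then
    pvBLoop text1 (remaining.filter (fun name => !pvStarts text1 name i))
      (cities ++ remaining.filter (fun name => pvStarts text1 name i)) (i + 1)
  else cities
termination_by text1.toList.length - i
decreasing_by rename_i h; omega

def getFirstCities_alt (text1 : String) (included2 : List String) (number : Int) : List String :=
  let cities : List String := []
  if PySem.Str.len text1 > 0 ∧ included2.length > 0 ∧ number > 0 then
    let cities := pvBLoop text1 included2 cities 0
    PySem.List.slice cities none (some number)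
  else cities

-- ===== PRECONDITION & SPEC =====
-- Pre_ excludes exactly the inputs where Python's text1.index raises ValueError in A:
-- the guard holds and some name of included2 is not a substring of text1.
def Pre_getFirstCities (text1 : String) (included2 : List String) (number : Int) : Prop :=
  (PySem.Str.len text1 > 0 ∧ included2.length > 0 ∧ number > 0) →
    ∀ s ∈ included2, PySem.Str.isIn s text1 = true
instance (text1 : String) (included2 : List String) (number : Int) : Decidable (Pre_getFirstCities text1 included2 number) := by unfold Pre_getFirstCities; infer_instance

def pvWitness_getFirstCities : String × List String × Int := ("paris lyon nice", ["nice", "paris", "lyon"], 2)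

def Spec_getFirstCities (text1 : String) (included2 : List String) (number : Int) (out : List String) : Prop := out = getFirstCities_alt text1 included2 number
instance (text1 : String) (included2 : List String) (number : Int) (out : List String) : Decidable (Spec_getFirstCities text1 included2 number out) := by unfold Spec_getFirstCities; infer_instance

-- ===== CLAIM (what is proved, stated in full; the proofs are below) =====
def Claim_equal_getFirstCities : Prop := ∀ (text1 : String) (included2 : List String) (number : Int), Dom_getFirstCities text1 included2 number → Pre_getFirstCities text1 included2 number → Spec_getFirstCities text1 included2 number (getFirstCities text1 included2 number)

-- ===== LEMMAS AND PROOFS =====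

-- the key: first position of s in text1 (as in A's sort); k s ∈ [0, len) for names inside Pre_
def pvKey (text1 : String) (s : String) : Int := PySem.Chars.find text1.toList s.toList

-- buckets 0,…,b-1 of a list under the key, concatenated bottom-up
def pvBuckets (text1 : String) (xs : List String) : Nat → List String
  | 0 => []
  | b + 1 => pvBuckets text1 xs b ++ xs.filter (fun s => decide (pvKey text1 s = (b : Int)))

-- buckets i,…,len-1, concatenated top-down (the order the sweep emits them)
def pvBucketsFrom (text1 : String) (len : Nat) (i : Nat) (xs : List String) : List String :=
  if i < len then
    xs.filter (fun s => decide (pvKey text1 s = (i : Int))) ++ pvBucketsFrom text1 len (i + 1) xs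
  else []
termination_by len - i

theorem pvBuckets_nil (text1 : String) (b : Nat) : pvBuckets text1 [] b = [] := by
  induction b with
  | zero => rfl
  | succ b ih => simp [pvBuckets, ih]

theorem pvMem_buckets (text1 : String) (xs : List String) (b : Nat) (y : String)
    (hy : y ∈ pvBuckets text1 xs b) : 0 ≤ pvKey text1 y ∧ pvKey text1 y < (b : Int) := by
  induction b with
  | zero => exact absurd hy (by simp [pvBuckets])
  | succ b ih =>
    rcases List.mem_append.mp (show y ∈ pvBuckets text1 xs b ++
        xs.filter (fun s => decide (pvKey text1 s = (b : Int))) from hy) with h | h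
    · have := ih h; push_cast; omega
    · simp only [List.mem_filter, decide_eq_true_eq] at h
      push_cast; omega

theorem pvInsertBy_append {α : Type} (lt : α → α → Bool) (x : α) (L1 L2 : List α)
    (h : ∀ y ∈ L2, lt x y = true) :
    PySem.List.insertBy lt x (L1 ++ L2) = PySem.List.insertBy lt x L1 ++ L2 := by
  induction L1 with
  | nil =>
    cases L2 with
    | nil => rfl
    | cons z t => simp [PySem.List.insertBy, h z (by simp)]
  | cons y t ih => simp [PySem.List.insertBy]; split_ifs <;> simp_all

theorem pvInsertBy_last {α : Type} (lt : α → α → Bool) (x : α) (L : List α)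
    (h : ∀ y ∈ L, lt x y = false) :
    PySem.List.insertBy lt x L = L ++ [x] := by
  induction L with
  | nil => rfl
  | cons y t ih => simp [PySem.List.insertBy, h y (by simp)]; exact ih (fun z hz => h z (by simp [hz]))

theorem pvBuckets_snoc_ge (text1 : String) (x : String) (ys : List String) (b : Nat)
    (h : (b : Int) ≤ pvKey text1 x) :
    pvBuckets text1 (ys ++ [x]) b = pvBuckets text1 ys b := by
  induction b with
  | zero => rfl
  | succ b ih =>
    have hb : (b : Int) ≤ pvKey text1 x := by push_cast at h ⊢; omega
    simp only [pvBuckets, List.filter_append, ih hb]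
    have : (pvKey text1 x = (b : Int)) = False := by
      simp only [eq_iff_iff, iff_false]; push_cast at h; omega
    simp [List.filter, this]

theorem pvInsertBy_buckets (text1 : String) (x : String) (b : Nat) (ys : List String)
    (h0 : 0 ≤ pvKey text1 x) (hb : pvKey text1 x < (b : Int)) :
    PySem.List.insertBy (fun a c => decide (pvKey text1 a < pvKey text1 c)) x (pvBuckets text1 ys b)
      = pvBuckets text1 (ys ++ [x]) b := by
  induction b with
  | zero => exact absurd hb (by omega)
  | succ b ih =>
    by_cases hxb : pvKey text1 x = (b : Int)
    · rw [pvBuckets, pvInsertBy_last]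
      · rw [pvBuckets, pvBuckets_snoc_ge text1 x ys b (by omega), List.filter_append,
            List.append_assoc]
        congr 1
        simp [List.filter, hxb]
      · intro y hy
        simp only [List.mem_append] at hy
        rcases hy with h | h
        · have := pvMem_buckets text1 ys b y h
          simp only [decide_eq_false_iff_not, not_lt]; omega
        · simp only [List.mem_filter, decide_eq_true_eq] at h
          simp only [decide_eq_false_iff_not, not_lt]; omega
    · have hlt : pvKey text1 x < (b : Int) := by push_cast at hb; omega
      rw [pvBuckets, pvInsertBy_append, ih hlt, pvBuckets, List.filter_append]
      · congr 1
        have : (pvKey text1 x = (b : Int)) = False := by simp [hxb]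
        simp [List.filter, this]
      · intro y hy
        simp only [List.mem_filter, decide_eq_true_eq] at hy
        simp only [decide_eq_true_eq]; omega

theorem pvFoldl_insertBy_buckets (text1 : String) (b : Nat) (xs : List String)
    (h : ∀ s ∈ xs, 0 ≤ pvKey text1 s ∧ pvKey text1 s < (b : Int)) :
    ∀ ys : List String,
      xs.foldl (fun acc x => PySem.List.insertBy (fun a c => decide (pvKey text1 a < pvKey text1 c)) x acc)
        (pvBuckets text1 ys b) = pvBuckets text1 (ys ++ xs) b := by
  induction xs with
  | nil => intro ys; simp
  | cons x t ih =>
    intro ys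
    have hx := h x (by simp)
    simp only [List.foldl_cons]
    rw [pvInsertBy_buckets text1 x b ys hx.1 hx.2, ih (fun s hs => h s (by simp [hs]))]
    simp

theorem pvSorted_eq_buckets (text1 : String) (b : Nat) (xs : List String)
    (h : ∀ s ∈ xs, 0 ≤ pvKey text1 s ∧ pvKey text1 s < (b : Int)) :
    PySem.List.sorted xs (fun s => pvKey text1 s) = pvBuckets text1 xs b := by
  rw [PySem.List.sorted_eq_foldl_insertBy]
  have := pvFoldl_insertBy_buckets text1 b xs h []
  simpa [pvBuckets_nil] using this

-- bridging top-down and bottom-up bucket concatenations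
theorem pvBucketsFrom_succ (text1 : String) (b : Nat) :
    ∀ (i : Nat) (xs : List String), i ≤ b →
      pvBucketsFrom text1 (b + 1) i xs
        = pvBucketsFrom text1 b i xs ++ xs.filter (fun s => decide (pvKey text1 s = (b : Int))) := by
  intro i xs hib
  by_cases hlt : i < b
  · rw [pvBucketsFrom, if_pos (by omega : i < b + 1),
        pvBucketsFrom_succ text1 b (i + 1) xs (by omega)]
    conv_rhs => rw [pvBucketsFrom]
    rw [if_pos hlt, List.append_assoc]
  · have hEq : i = b := by omega
    rw [hEq]
    rw [pvBucketsFrom, if_pos (by omega : b < b + 1)]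
    conv_lhs => rw [pvBucketsFrom]
    conv_rhs => rw [pvBucketsFrom]
    rw [if_neg (by omega : ¬ b + 1 < b + 1), if_neg (by omega : ¬ b < b)]
    simp
termination_by i xs hib => b - i

theorem pvBucketsFrom_zero (text1 : String) (b : Nat) (xs : List String) :
    pvBucketsFrom text1 b 0 xs = pvBuckets text1 xs b := by
  induction b with
  | zero => rw [pvBucketsFrom]; rfl
  | succ b ih => rw [pvBucketsFrom_succ text1 b 0 xs (by omega), ih]; rfl

theorem pvBucketsFrom_nil (text1 : String) (b : Nat) : ∀ (i : Nat), pvBucketsFrom text1 b i [] = [] := by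
  intro i
  rw [pvBucketsFrom]; split
  · simpa using pvBucketsFrom_nil text1 b (i + 1)
  · rfl
termination_by i => b - i

-- removing the bucket already emitted does not change later buckets
theorem pvBucketsFrom_filter_ne (text1 : String) (b : Nat) (iDone : Nat) :
    ∀ (j : Nat) (xs : List String), iDone < j →
      pvBucketsFrom text1 b j (xs.filter (fun s => !decide (pvKey text1 s = (iDone : Int))))
        = pvBucketsFrom text1 b j xs := by
  intro j xs hj
  conv_lhs => rw [pvBucketsFrom]
  conv_rhs => rw [pvBucketsFrom]
  split
  · rw [pvBucketsFrom_filter_ne text1 b iDone (j + 1) xs (by omega)]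
    congr 1
    rw [List.filter_filter]
    apply List.filter_congr
    intro s _
    by_cases hs : pvKey text1 s = (iDone : Int)
    · have hne : ¬ pvKey text1 s = (j : Int) := by rw [hs]; push_cast; omega
      simp [hs, hne]
      omega
    · simp [hs]
  · rfl
termination_by j xs hj => b - j

-- inside Pre_, under the guard: the key of every name is in [0, len)
theorem pvKey_bounds (text1 : String) (s : String)
    (hin : PySem.Str.isIn s text1 = true) (hlen : 0 < text1.toList.length) :
    0 ≤ pvKey text1 s ∧ pvKey text1 s < (text1.toList.length : Int) := by
  have hinf : s.toList <:+: text1.toList := (PySem.Str.isIn_iff_infix s text1).mp hin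
  have h0 : 0 ≤ pvKey text1 s := (PySem.Chars.find_nonneg_iff text1.toList s.toList).mpr hinf
  have hle : pvKey text1 s ≤ (text1.toList.length : Int) := PySem.Chars.find_le_length text1.toList s.toList
  refine ⟨h0, ?_⟩
  by_cases hnil : s.toList = []
  · have : pvKey text1 s = 0 := by simp [pvKey, hnil, PySem.Chars.find_nil]
    omega
  · have hspec := (PySem.Chars.find_spec (show 0 ≤ PySem.Chars.find text1.toList s.toList from h0)).1
    by_contra hge
    have heq : pvKey text1 s = (text1.toList.length : Int) := by omega
    have h2 : (PySem.Chars.find text1.toList s.toList).toNat = text1.toList.length := by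
      have h3 : (pvKey text1 s).toNat = text1.toList.length := by omega
      exact h3
    rw [h2] at hspec
    simp only [List.drop_length] at hspec
    exact hnil (List.prefix_nil.mp hspec)

-- with key ≥ i, the sweep's prefix test at position i is exactly 'key = i'
theorem pvStarts_iff_key (text1 : String) (s : String) (i : Nat)
    (hge : (i : Int) ≤ pvKey text1 s) (h0 : 0 ≤ pvKey text1 s) :
    pvStarts text1 s i = decide (pvKey text1 s = (i : Int)) := by
  have hspec := PySem.Chars.find_spec (show 0 ≤ PySem.Chars.find text1.toList s.toList from h0)
  by_cases heq : pvKey text1 s = (i : Int)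
  · have h2 : (PySem.Chars.find text1.toList s.toList).toNat = i := by
      have h3 : (pvKey text1 s).toNat = i := by omega
      exact h3
    rw [h2] at hspec
    simp [pvStarts, heq, (PySem.Chars.startswith_iff _ _).mpr hspec.1]
  · have hlt : i < (pvKey text1 s).toNat := by omega
    have hnp := hspec.2 i hlt
    have : pvStarts text1 s i = false := by
      simp only [pvStarts]
      by_contra hT
      exact hnp ((PySem.Chars.startswith_iff _ _).mp (by simpa using Bool.not_eq_false _ |>.mp hT))
    simp [this, heq]

-- the sweep emits the buckets from i upward
theorem pvBLoop_eq_bucketsFrom (text1 : String) :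
    ∀ (i : Nat) (R acc : List String),
      (∀ s ∈ R, (i : Int) ≤ pvKey text1 s ∧ pvKey text1 s < (text1.toList.length : Int)) →
      pvBLoop text1 R acc i = acc ++ pvBucketsFrom text1 text1.toList.length i R := by
  intro i R acc hInv
  rw [pvBLoop]
  by_cases hc : i < text1.toList.length ∧ R ≠ []
  · rw [if_pos hc]
    have hkey : ∀ s ∈ R, pvStarts text1 s i = decide (pvKey text1 s = (i : Int)) := by
      intro s hs
      have h := hInv s hs
      exact pvStarts_iff_key text1 s i h.1 (le_trans (by positivity) h.1)
    have hfilt1 : R.filter (fun name => pvStarts text1 name i)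
        = R.filter (fun s => decide (pvKey text1 s = (i : Int))) :=
      List.filter_congr (fun s hs => hkey s hs)
    have hfilt2 : R.filter (fun name => !pvStarts text1 name i)
        = R.filter (fun s => !decide (pvKey text1 s = (i : Int))) :=
      List.filter_congr (fun s hs => by rw [hkey s hs])
    have hInv' : ∀ s ∈ R.filter (fun name => !pvStarts text1 name i),
        ((i + 1 : Nat) : Int) ≤ pvKey text1 s ∧ pvKey text1 s < (text1.toList.length : Int) := by
      intro s hs
      rw [hfilt2] at hs
      simp only [List.mem_filter, Bool.not_eq_eq_eq_not, Bool.not_true, decide_eq_false_iff_not] at hs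
      have h := hInv s hs.1
      push_cast
      constructor
      · have := hs.2; omega
      · exact h.2
    rw [pvBLoop_eq_bucketsFrom text1 (i + 1) _ _ hInv', hfilt1, hfilt2,
        pvBucketsFrom_filter_ne text1 text1.toList.length i (i + 1) R (by omega)]
    conv_rhs => rw [pvBucketsFrom]
    rw [if_pos hc.1, List.append_assoc]
  · rw [if_neg hc]
    rcases Decidable.not_and_iff_not_or_not.mp hc with h | h
    · rw [pvBucketsFrom, if_neg h]; simp
    · have : R = [] := by simpa using h
      rw [this, pvBucketsFrom_nil text1 text1.toList.length i]; simp
termination_by i R acc hInv => text1.toList.length - i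
decreasing_by have := hc.1; omega

-- the whole sweep = stable sort by first position (inside Pre_, under the guard)
theorem pvBLoop_eq_sorted (text1 : String) (included2 : List String)
    (hlen : 0 < text1.toList.length)
    (hin : ∀ s ∈ included2, PySem.Str.isIn s text1 = true) :
    pvBLoop text1 included2 [] 0 = PySem.List.sorted included2 (fun s => pvKey text1 s) := by
  have hb : ∀ s ∈ included2, 0 ≤ pvKey text1 s ∧ pvKey text1 s < (text1.toList.length : Int) :=
    fun s hs => pvKey_bounds text1 s (hin s hs) hlen
  rw [pvBLoop_eq_bucketsFrom text1 0 included2 [] (fun s hs => ⟨by simpa using (hb s hs).1, (hb s hs).2⟩),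
      pvBucketsFrom_zero, pvSorted_eq_buckets text1 text1.toList.length included2 hb]
  simp

-- A side (as in the pair-table reduction): insertBy commutes with pairing each element with its key
theorem pvInsertBy_map {α κ : Type} [LT κ] [DecidableLT κ] (k : α → κ) (x : α) (ys : List α) :
    PySem.List.insertBy (fun a b => decide ((a : α × κ).2 < (b : α × κ).2)) (x, k x) (ys.map (fun s => (s, k s)))
      = (PySem.List.insertBy (fun a b => decide (k a < k b)) x ys).map (fun s => (s, k s)) := by
  induction ys with
  | nil => simp [PySem.List.insertBy]
  | cons y t ih => simp [PySem.List.insertBy]; split_ifs <;> simp_all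

-- sorting the pair table (name, key name) by second component = sorted name list, paired
theorem pvSorted_pairs {α κ : Type} [LT κ] [DecidableLT κ] (k : α → κ) (xs : List α) :
    PySem.List.sorted (xs.map (fun s => (s, k s))) (fun p => p.2)
      = (PySem.List.sorted xs k).map (fun s => (s, k s)) := by
  rw [PySem.List.sorted_eq_foldl_insertBy, PySem.List.sorted_eq_foldl_insertBy]
  have h : ∀ (acc : List α),
      (xs.map (fun s => (s, k s))).foldl
        (fun acc p => PySem.List.insertBy (fun a b => decide ((a : α × κ).2 < (b : α × κ).2)) p acc)
        (acc.map (fun s => (s, k s)))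
      = (xs.foldl (fun acc x => PySem.List.insertBy (fun a b => decide (k a < k b)) x acc) acc).map
          (fun s => (s, k s)) := by
    induction xs with
    | nil => intro acc; simp
    | cons x t ih =>
      intro acc
      simp only [List.map_cons, List.foldl_cons]
      rw [pvInsertBy_map, ih]
  simpa using h []

-- ===== VERDICT (by name: the statement is the Claim_ definition above) =====
theorem getFirstCities_spec : Claim_equal_getFirstCities := by
  intro text1 included2 number _ hpre
  unfold Spec_getFirstCities getFirstCities getFirstCities_alt
  by_cases hg : PySem.Str.len text1 > 0 ∧ included2.length > 0 ∧ number > 0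
  · rw [if_pos hg, if_pos hg]
    have hin := hpre hg
    have hfind : ∀ s ∈ included2, PySem.Chars.find text1.toList s.toList ≠ -1 := by
      intro s hs
      simpa [PySem.Chars.find_ne_neg_one_iff, ← PySem.Str.isIn_iff_infix] using hin s hs
    have htable : included2.foldl (fun acc incl =>
        let posIncl := PySem.Str.find text1 incl
        let posIncl := if posIncl == -1 then PySem.Str.find text1 (PySem.Str.upper incl) else posIncl
        acc ++ [(incl, posIncl)]) []
        = included2.map (fun s => (s, PySem.Str.find text1 s)) := by
      rw [PySem.List.foldl_congr_mem' (g := fun acc incl => acc ++ [(incl, PySem.Str.find text1 incl)])]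
      · simpa using PySem.List.foldl_append_singleton_eq_map
          (f := fun s => (s, PySem.Str.find text1 s)) (l := included2) (acc := [])
      · intro x hx acc
        simp [hfind x hx]
    have hlen : 0 < text1.toList.length := by
      have := hg.1; simpa [PySem.Str.len_eq, PySem.Chars.len_eq] using this
    have hsweep : pvBLoop text1 included2 [] 0
        = PySem.List.sorted included2 (fun s => PySem.Str.find text1 s) := by
      rw [pvBLoop_eq_sorted text1 included2 hlen hin,
          show (fun s => pvKey text1 s) = (fun s => PySem.Str.find text1 s) from by
            funext s; simp [pvKey]]
    simp only [htable, pvSorted_pairs, PySem.List.slice_zero_start, hsweep]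
    rw [PySem.List.slice_to _ (by omega : (0:Int) ≤ number),
        PySem.List.slice_to _ (by omega : (0:Int) ≤ number),
        List.map_take, List.map_map]
    rw [show ((fun (x : String × Int) => x.1) ∘ fun s => (s, PySem.Str.find text1 s)) = id from rfl,
        List.map_id]
  · rw [if_neg hg, if_neg hg]
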